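-- pv_equiv track=rewrite | github.com/edu-matthew-pham/edu-pilot | edu/agents/tutor.py | parse_activity_plan
-- ===== SOURCE A (Python) =====
-- def parse_activity_plan(activity_plan: str) -> list:
--     # Parse the activity plan string into a list of activities
--     # This is a simple implementation and might need to be adjusted based on your activity plan format
--     activities = []
--     current_activity = {}
--     for line in activity_plan.split('\n'):
--         if line.strip().startswith(('1.', '2.', '3.', '4.', '5.')):
--             if current_activity:
--                 activities.append(current_activity)
--             current_activity = {'step': line.strip()}
--         elif 'Title:' in line:
--             current_activity['title'] = line.split('Title:')[1].strip()
--         elif 'Activity:' in line: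
--             current_activity['description'] = line.split('Activity:')[1].strip()
--     if current_activity:
--         activities.append(current_activity)
--     return activities
-- ===== SOURCE B (Python) =====
-- def _is_step(line):
--     return line.strip().startswith(('1.', '2.', '3.', '4.', '5.'))
--
--
-- def _segments(lines):
--     # Partition the lines into a preamble segment plus one segment per step line.
--     segments = []
--     current = []
--     for line in lines:
--         if _is_step(line):
--             segments.append(current)
--             current = [line]
--         else:
--             current.append(line)
--     segments.append(current)
--     return segments
--
--
-- def _build(seg, has_step):
--     # Build one activity dict from a segment's lines.
--     d = {}
--     rest = seg
--     if has_step: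
--         d['step'] = seg[0].strip()
--         rest = seg[1:]
--     for line in rest:
--         if 'Title:' in line:
--             d['title'] = line.split('Title:')[1].strip()
--         elif 'Activity:' in line:
--             d['description'] = line.split('Activity:')[1].strip()
--     return d
--
--
-- def parse_activity_plan(activity_plan: str) -> list:
--     result = []
--     for i, seg in enumerate(_segments(activity_plan.split('\n'))):
--         d = _build(seg, i > 0)
--         if d:
--             result.append(d)
--     return result
-- ===== Notes on version B (the rewrite author's own statement) =====
-- stated objective: alternative
-- what changed: A's single stateful line loop (one mutable current dict, flushed on each step line) is replaced by a two-pass decomposition: pass 1 partitions the lines into a preamble segment plus one segment per step-prefixed line, pass 2 builds each segment's dict independently from its lines and keeps the non-empty ones.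
import Mathlib
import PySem

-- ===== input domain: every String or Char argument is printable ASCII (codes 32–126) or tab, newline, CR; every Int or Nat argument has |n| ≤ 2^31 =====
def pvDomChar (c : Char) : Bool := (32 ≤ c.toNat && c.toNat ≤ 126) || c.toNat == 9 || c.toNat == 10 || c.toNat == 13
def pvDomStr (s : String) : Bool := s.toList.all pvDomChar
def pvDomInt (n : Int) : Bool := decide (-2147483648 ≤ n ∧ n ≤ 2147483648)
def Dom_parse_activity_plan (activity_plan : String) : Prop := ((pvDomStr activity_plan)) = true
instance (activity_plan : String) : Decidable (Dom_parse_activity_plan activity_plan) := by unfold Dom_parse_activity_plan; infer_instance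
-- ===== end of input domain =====

-- B re-structures A's single stateful line loop as segmentation into step-delimited segments plus a
-- per-segment dict build (same values; objective: alternative decomposition, not speed).

-- ===== PORT A =====
-- one iteration of A's for-loop: state = (activities, current_activity)
def pvLoopA (st : List (PySem.Dict String String) × PySem.Dict String String) (line : String) :
    List (PySem.Dict String String) × PySem.Dict String String :=
  if PySem.Str.startswith (PySem.Str.strip line) "1." || PySem.Str.startswith (PySem.Str.strip line) "2." ||
     PySem.Str.startswith (PySem.Str.strip line) "3." || PySem.Str.startswith (PySem.Str.strip line) "4." ||
     PySem.Str.startswith (PySem.Str.strip line) "5." then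
    ((if st.2.items.isEmpty then st.1 else st.1 ++ [st.2]),
      PySem.Dict.ofList [("step", PySem.Str.strip line)])
  else if PySem.Str.isIn "Title:" line then
    (st.1, st.2.insert "title" (PySem.Str.strip (((PySem.Str.split? line "Title:").getD []).getD 1 "")))
  else if PySem.Str.isIn "Activity:" line then
    (st.1, st.2.insert "description" (PySem.Str.strip (((PySem.Str.split? line "Activity:").getD []).getD 1 "")))
  else st

def parse_activity_plan (activity_plan : String) : List (List (String × String)) :=
  let r := ((PySem.Str.split? activity_plan "\n").getD []).foldl pvLoopA ([], PySem.Dict.empty)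
  (if r.2.items.isEmpty then r.1 else r.1 ++ [r.2]).map PySem.Dict.items

-- ===== PORT B =====
def pvIsStep (line : String) : Bool :=
  PySem.Str.startswith (PySem.Str.strip line) "1." || PySem.Str.startswith (PySem.Str.strip line) "2." ||
  PySem.Str.startswith (PySem.Str.strip line) "3." || PySem.Str.startswith (PySem.Str.strip line) "4." ||
  PySem.Str.startswith (PySem.Str.strip line) "5."

-- Source B's _segments loop: state = (segments, current)
def pvSegLoop (st : List (List String) × List String) (line : String) :
    List (List String) × List String :=
  if pvIsStep line then (st.1 ++ [st.2], [line]) else (st.1, st.2 ++ [line])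

-- one line of _build's loop
def pvUpd (d : PySem.Dict String String) (line : String) : PySem.Dict String String :=
  if PySem.Str.isIn "Title:" line then
    d.insert "title" (PySem.Str.strip (((PySem.Str.split? line "Title:").getD []).getD 1 ""))
  else if PySem.Str.isIn "Activity:" line then
    d.insert "description" (PySem.Str.strip (((PySem.Str.split? line "Activity:").getD []).getD 1 ""))
  else d

-- Source B's _build; seg[0] ported as headD "" (only evaluated with hasStep, where the segment starts with its step line)
def pvBuild (seg : List String) (hasStep : Bool) : PySem.Dict String String :=
  let d0 : PySem.Dict String String :=
    if hasStep then PySem.Dict.ofList [("step", PySem.Str.strip (seg.headD ""))] else PySem.Dict.empty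
  (if hasStep then seg.tail else seg).foldl pvUpd d0

def parse_activity_plan_alt (activity_plan : String) : List (List (String × String)) :=
  let r := ((PySem.Str.split? activity_plan "\n").getD []).foldl pvSegLoop ([], [])
  (PySem.List.enumerate (r.1 ++ [r.2])).foldl
    (fun res p =>
      let d := pvBuild p.2 (decide (0 < p.1))
      if d.items.isEmpty then res else res ++ [d.items]) []

-- ===== PRECONDITION & SPEC =====
def Spec_parse_activity_plan (activity_plan : String) (out : List (List (String × String))) : Prop := out = parse_activity_plan_alt activity_plan
instance (activity_plan : String) (out : List (List (String × String))) : Decidable (Spec_parse_activity_plan activity_plan out) := by unfold Spec_parse_activity_plan; infer_instance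

-- ===== CLAIM (what is proved, stated in full; the proofs are below) =====
def Claim_equal_parse_activity_plan : Prop := ∀ (activity_plan : String), Dom_parse_activity_plan activity_plan → Spec_parse_activity_plan activity_plan (parse_activity_plan activity_plan)

-- ===== LEMMAS AND PROOFS =====

-- emission of one finished activity dict ('if d: result.append(d)')
def pvEmit (d : PySem.Dict String String) : List (List (String × String)) :=
  if d.items.isEmpty then [] else [d.items]

-- what B's second pass produces on a list of segments (first = preamble, rest step segments)
def pvSegsOut : List (List String) → List (List (String × String))
  | [] => []
  | s0 :: rest => pvEmit (pvBuild s0 false) ++ rest.flatMap (fun s => pvEmit (pvBuild s true))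

-- A's finalisation applied to its loop state
def pvAfin (p : List (PySem.Dict String String) × PySem.Dict String String) :
    List (List (String × String)) :=
  (if p.2.items.isEmpty then p.1 else p.1 ++ [p.2]).map PySem.Dict.items

-- one non-step line of A's loop is exactly _build's update
lemma updA_step (acc : List (PySem.Dict String String)) (d : PySem.Dict String String)
    (line : String) (hns : pvIsStep line = false) :
    pvLoopA (acc, d) line = (acc, pvUpd d line) := by
  unfold pvIsStep at hns
  simp only [pvLoopA, pvUpd, hns, Bool.false_eq_true, if_false]
  split_ifs <;> rfl

-- appending a line to a segment updates its built dict
lemma build_snoc (cur : List String) (l : String) (hasStep : Bool)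
    (hWF : hasStep = true → cur ≠ []) :
    pvBuild (cur ++ [l]) hasStep = pvUpd (pvBuild cur hasStep) l := by
  cases hasStep with
  | false => simp [pvBuild, List.foldl_append]
  | true =>
    cases cur with
    | nil => exact absurd rfl (hWF rfl)
    | cons a t => simp [pvBuild, List.foldl_append]

-- B's enumerate pass computes pvSegsOut
lemma enum_tail (rest : List (List String)) :
    ∀ (o : Int), 0 < o → ∀ (res : List (List (String × String))),
    (PySem.List.enumerate rest o).foldl
      (fun res p =>
        if (pvBuild p.2 (decide (0 < p.1))).items.isEmpty then res
        else res ++ [(pvBuild p.2 (decide (0 < p.1))).items]) res =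
      res ++ rest.flatMap (fun s => pvEmit (pvBuild s true)) := by
  induction rest with
  | nil => intro o ho res; simp [PySem.List.enumerate]
  | cons s ss ih =>
    intro o ho res
    simp only [PySem.List.enumerate, List.foldl_cons, List.flatMap_cons]
    rw [ih (o + 1) (by omega)]
    simp only [decide_eq_true ho, pvEmit]
    split <;> simp [List.append_assoc]

lemma enum_out (segs : List (List String)) :
    (PySem.List.enumerate segs).foldl
      (fun res p =>
        let d := pvBuild p.2 (decide (0 < p.1))
        if d.items.isEmpty then res else res ++ [d.items]) [] = pvSegsOut segs := by
  cases segs with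
  | nil => simp [PySem.List.enumerate, pvSegsOut]
  | cons s0 rest =>
    simp only [PySem.List.enumerate, List.foldl_cons, pvSegsOut]
    rw [(by norm_num : ((0:Int)+1) = 1), enum_tail rest 1 (by omega)]
    norm_num [pvEmit]

-- closing the open segment
lemma segsOut_snoc (done : List (List String)) (cur : List String) :
    pvSegsOut (done ++ [cur]) = pvSegsOut done ++ pvEmit (pvBuild cur (!done.isEmpty)) := by
  cases done with
  | nil => simp [pvSegsOut]
  | cons s0 rest => simp [pvSegsOut, List.flatMap_append]

lemma afin_eq (acc : List (PySem.Dict String String)) (d : PySem.Dict String String) :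
    pvAfin (acc, d) = acc.map PySem.Dict.items ++ pvEmit d := by
  simp only [pvAfin, pvEmit]
  split <;> simp

-- the main loop correspondence
lemma main_loop (lines : List String) :
    ∀ (accA : List (PySem.Dict String String)) (done : List (List String)) (cur : List String),
    accA.map PySem.Dict.items = pvSegsOut done →
    (done ≠ [] → cur ≠ []) →
    pvAfin (lines.foldl pvLoopA (accA, pvBuild cur (!done.isEmpty)))
      = pvSegsOut ((lines.foldl pvSegLoop (done, cur)).1 ++ [(lines.foldl pvSegLoop (done, cur)).2]) := by
  induction lines with
  | nil =>
    intro accA done cur hacc hWF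
    simp only [List.foldl_nil]
    rw [afin_eq, segsOut_snoc, hacc]
  | cons l ls ih =>
    intro accA done cur hacc hWF
    simp only [List.foldl_cons]
    by_cases hstep : pvIsStep l = true
    · have hA : pvLoopA (accA, pvBuild cur (!done.isEmpty)) l =
          ((if (pvBuild cur (!done.isEmpty)).items.isEmpty then accA
            else accA ++ [pvBuild cur (!done.isEmpty)]),
           PySem.Dict.ofList [("step", PySem.Str.strip l)]) := by
        unfold pvIsStep at hstep
        simp only [pvLoopA, hstep, if_true]
      have hB : pvSegLoop (done, cur) l = (done ++ [cur], [l]) := by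
        simp [pvSegLoop, hstep]
      have hbuild : PySem.Dict.ofList [("step", PySem.Str.strip l)]
          = pvBuild [l] (!(done ++ [cur]).isEmpty) := by
        simp [pvBuild]
      rw [hA, hB, hbuild]
      refine ih _ _ _ ?_ (fun _ => by simp)
      rw [segsOut_snoc, ← hacc]
      split <;> simp_all [pvEmit]
    · have hsf : pvIsStep l = false := by simpa using hstep
      have hB : pvSegLoop (done, cur) l = (done, cur ++ [l]) := by
        simp [pvSegLoop, hsf]
      have hA : pvLoopA (accA, pvBuild cur (!done.isEmpty)) l =
          (accA, pvBuild (cur ++ [l]) (!done.isEmpty)) := by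
        rw [updA_step accA _ l hsf, build_snoc cur l (!done.isEmpty)
          (fun h => hWF (fun hd => by simp [hd] at h))]
      rw [hA, hB]
      exact ih accA done (cur ++ [l]) hacc (fun _ => by simp)

-- ===== VERDICT (by name: the statement is the Claim_ definition above) =====
theorem parse_activity_plan_spec : Claim_equal_parse_activity_plan := by
  intro s _
  show parse_activity_plan s = parse_activity_plan_alt s
  simp only [parse_activity_plan, parse_activity_plan_alt]
  rw [enum_out]
  have h := main_loop ((PySem.Str.split? s "\n").getD []) [] [] [] rfl
    (fun h => absurd rfl h)
  have h0 : pvBuild [] (!(([] : List (List String)).isEmpty)) = PySem.Dict.empty := rfl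
  rw [h0] at h
  exact h
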